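-- pv_equiv track=rewrite | github.com/sangaw/candle-pattern-test | src/ai_agent/tool_based_agent/tool_based_agent.py | _extract_instrument_types
-- ===== SOURCE A (Python) =====
-- from typing import List, Dict, Optional, Tuple, Any
--
-- def _extract_instrument_types(input_lower: str) -> List[str]:
--     """Extract preferred instrument types from user input."""
--     types = []
--     if any(word in input_lower for word in ['futures', 'fut']):
--         types.append('FUT')
--     if any(word in input_lower for word in ['options', 'ce', 'pe']):
--         types.extend(['CE', 'PE'])
--     if any(word in input_lower for word in ['equity', 'stock', 'eq']):
--         types.append('EQ')
--     return types
-- ===== SOURCE B (Python) =====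
-- from typing import List
--
-- def _extract_instrument_types(input_lower: str) -> List[str]:
--     """Extract preferred instrument types from user input.
--
--     'futures' contains 'fut' and 'equity' contains 'eq', so those two
--     substring checks are redundant and dropped; the result is a closed-form
--     concatenation of boolean-multiplied tag lists (no mutated accumulator).
--     """
--     fut = 'fut' in input_lower
--     opt = 'options' in input_lower or 'ce' in input_lower or 'pe' in input_lower
--     eqy = 'eq' in input_lower or 'stock' in input_lower
--     return ['FUT'] * fut + ['CE', 'PE'] * opt + ['EQ'] * eqy
-- ===== Notes on version B (the rewrite author's own statement) =====
-- stated objective: simpler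
-- what changed: Drops the redundant 'futures' and 'equity' substring checks (each subsumed by its own substring 'fut' / 'eq') and returns a single closed-form concatenation of boolean-multiplied tag lists instead of conditionally mutating an accumulator.
import Mathlib
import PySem

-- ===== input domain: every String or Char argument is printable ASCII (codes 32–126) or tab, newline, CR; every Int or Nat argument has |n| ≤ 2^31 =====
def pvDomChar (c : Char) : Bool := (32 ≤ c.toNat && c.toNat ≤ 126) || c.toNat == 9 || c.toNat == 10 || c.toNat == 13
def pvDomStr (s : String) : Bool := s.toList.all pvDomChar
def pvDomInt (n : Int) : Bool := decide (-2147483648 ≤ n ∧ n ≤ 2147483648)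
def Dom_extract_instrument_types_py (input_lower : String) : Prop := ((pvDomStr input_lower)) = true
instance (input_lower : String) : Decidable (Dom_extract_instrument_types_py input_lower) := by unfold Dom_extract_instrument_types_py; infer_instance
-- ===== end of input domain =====

-- B drops the redundant 'futures'/'equity' checks (subsumed by their substrings 'fut'/'eq') and
-- returns one closed-form concatenation of boolean-multiplied tag lists instead of mutating an accumulator (simpler).

-- ===== PORT A =====
def extract_instrument_types_py (input_lower : String) : List String :=
  let types : List String := []
  let types := if ["futures", "fut"].any (fun w => PySem.Str.isIn w input_lower) then
      types ++ ["FUT"] else types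
  let types := if ["options", "ce", "pe"].any (fun w => PySem.Str.isIn w input_lower) then
      types ++ ["CE", "PE"] else types
  let types := if ["equity", "stock", "eq"].any (fun w => PySem.Str.isIn w input_lower) then
      types ++ ["EQ"] else types
  types

-- ===== PORT B =====
-- Python's `['FUT'] * fut` with a bool multiplier is the list when fut is true, [] otherwise.
def pvBoolMul (b : Bool) (xs : List String) : List String := if b then xs else []

def extract_instrument_types_py_alt (input_lower : String) : List String :=
  let fut := PySem.Str.isIn "fut" input_lower
  let opt := PySem.Str.isIn "options" input_lower || PySem.Str.isIn "ce" input_lower || PySem.Str.isIn "pe" input_lower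
  let eqy := PySem.Str.isIn "eq" input_lower || PySem.Str.isIn "stock" input_lower
  pvBoolMul fut ["FUT"] ++ pvBoolMul opt ["CE", "PE"] ++ pvBoolMul eqy ["EQ"]

-- ===== PRECONDITION & SPEC =====
def Spec_extract_instrument_types_py (input_lower : String) (out : List String) : Prop := out = extract_instrument_types_py_alt input_lower
instance (input_lower : String) (out : List String) : Decidable (Spec_extract_instrument_types_py input_lower out) := by unfold Spec_extract_instrument_types_py; infer_instance

-- ===== CLAIM =====
def Claim_equal_extract_instrument_types_py : Prop := ∀ (input_lower : String), Dom_extract_instrument_types_py input_lower → Spec_extract_instrument_types_py input_lower (extract_instrument_types_py input_lower)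

-- ===== LEMMAS AND PROOFS =====

-- 'fut' is a substring of 'futures', so any occurrence of 'futures' yields one of 'fut'.
theorem isIn_fut_of_futures (s : String) :
    PySem.Str.isIn "futures" s = true → PySem.Str.isIn "fut" s = true := by
  simp only [PySem.Str.isIn_iff_infix]
  intro h
  exact List.IsInfix.trans (List.IsPrefix.isInfix (by decide)) h

-- 'eq' is a substring of 'equity', so any occurrence of 'equity' yields one of 'eq'.
theorem isIn_eq_of_equity (s : String) :
    PySem.Str.isIn "equity" s = true → PySem.Str.isIn "eq" s = true := by
  simp only [PySem.Str.isIn_iff_infix]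
  intro h
  exact List.IsInfix.trans (List.IsPrefix.isInfix (by decide)) h

-- ===== VERDICT =====
theorem extract_instrument_types_py_spec : Claim_equal_extract_instrument_types_py := by
  intro s _
  unfold Spec_extract_instrument_types_py extract_instrument_types_py extract_instrument_types_py_alt pvBoolMul
  simp only [List.any_cons, List.any_nil, Bool.or_false, Bool.or_assoc]
  have hf : (PySem.Str.isIn "futures" s || PySem.Str.isIn "fut" s) = PySem.Str.isIn "fut" s := by
    cases h : PySem.Str.isIn "futures" s
    · simp only [Bool.false_or]
    · rw [isIn_fut_of_futures s h]; rfl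
  have he : (PySem.Str.isIn "equity" s || (PySem.Str.isIn "stock" s || PySem.Str.isIn "eq" s))
      = (PySem.Str.isIn "eq" s || PySem.Str.isIn "stock" s) := by
    cases h : PySem.Str.isIn "equity" s
    · simp only [Bool.false_or]; exact Bool.or_comm _ _
    · rw [isIn_eq_of_equity s h]
      cases PySem.Str.isIn "stock" s <;> rfl
  rw [hf, he]
  cases PySem.Str.isIn "fut" s <;>
    cases (PySem.Str.isIn "options" s || (PySem.Str.isIn "ce" s || PySem.Str.isIn "pe" s)) <;>
    cases (PySem.Str.isIn "eq" s || PySem.Str.isIn "stock" s) <;> rfl
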